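-- pv_equiv track=rewrite | github.com/Moussa-Kalla/Advent_of_code_2024 | main/Day_9.py | find_space_for_file
-- ===== SOURCE A (Python) =====
-- def find_space_for_file(disq, file_start, file_length):
--     free_count = 0
--     free_start = -1
--     best_start = -1
--
--     for i in range(file_start):
--         if disq[i] == -1:
--             if free_count == 0:
--                 free_start = i
--             free_count += 1
--             if free_count >= file_length:
--                 best_start = free_start
--                 break
--         else:
--             free_count = 0
--             free_start = -1
--
--     return best_start
-- ===== SOURCE B (Python) =====
-- def find_space_for_file(disq, file_start, file_length):
--     # Run-based scan: jump over maximal runs instead of counting cell by cell.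
--     end = min(max(file_start, 0), len(disq))
--     i = 0
--     while i < end:
--         if disq[i] == -1:
--             j = i + 1
--             while j < end and disq[j] == -1:
--                 j += 1
--             if j - i >= file_length:
--                 return i
--             i = j
--         else:
--             i += 1
--     return -1
-- ===== Notes on version B (the rewrite author's own statement) =====
-- stated objective: alternative
-- what changed: B scans maximal runs of free cells (inner scan to the run's end, one length test per run) instead of A's per-cell counter that resets on every non-free cell.
-- outside the precondition, e.g. on find_space_for_file([-1, -1], 5, 2): A returns 0, B returns 0; on find_space_for_file([0], 3, 1): A raises IndexError, B returns -1
import Mathlib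
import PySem

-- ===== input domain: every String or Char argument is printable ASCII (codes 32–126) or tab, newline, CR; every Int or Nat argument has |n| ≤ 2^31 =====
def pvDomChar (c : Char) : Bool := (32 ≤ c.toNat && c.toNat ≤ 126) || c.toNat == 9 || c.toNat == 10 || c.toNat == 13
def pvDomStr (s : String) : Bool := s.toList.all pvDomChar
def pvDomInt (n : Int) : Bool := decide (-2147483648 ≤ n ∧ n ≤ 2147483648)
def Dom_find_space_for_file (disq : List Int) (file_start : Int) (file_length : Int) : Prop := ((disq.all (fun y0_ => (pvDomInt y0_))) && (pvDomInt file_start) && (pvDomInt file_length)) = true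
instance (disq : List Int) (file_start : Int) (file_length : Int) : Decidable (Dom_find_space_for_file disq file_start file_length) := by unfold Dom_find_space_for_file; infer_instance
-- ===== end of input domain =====

-- B scans maximal runs of free cells (one length test per run) instead of A's
-- per-cell counter that resets on every non-free cell; same cost, different decomposition.
-- Equivalence is on the return value; neither program mutates its arguments.

-- ===== PORT A =====
-- the loop body of A over the remaining indices, state = (free_count, free_start, best_start)
def goA (disq : List Int) (fl : Int) : List Int → Int × Int × Int → Int
  | [], st => st.2.2
  | i :: rest, (fc, fs, best) =>
    match PySem.List.pyGet? disq i with
    | none => best   -- Python raises IndexError here; such inputs are outside Pre_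
    | some v =>
      if v = -1 then
        let fs' := if fc = 0 then i else fs
        let fc' := fc + 1
        if fl ≤ fc' then fs'    -- best_start = free_start; break
        else goA disq fl rest (fc', fs', best)
      else goA disq fl rest (0, -1, best)

def find_space_for_file (disq : List Int) (file_start : Int) (file_length : Int) : Int :=
  goA disq file_length (PySem.List.pyRange 0 file_start 1) (0, -1, -1)

-- ===== PORT B =====
-- inner while loop of B: end of the maximal run of -1 starting at j (within e)
def runEnd (disq : List Int) (e : Nat) (j : Nat) : Nat :=
  if j < e then
    if disq.getD j 0 = -1 then runEnd disq e (j + 1) else j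
  else j
termination_by e - j

theorem le_runEnd (disq : List Int) (e j : Nat) : j ≤ runEnd disq e j := by
  unfold runEnd
  split
  · split
    · have := le_runEnd disq e (j + 1); omega
    · exact le_refl j
  · exact le_refl j
termination_by e - j

-- outer while loop of B
def goB (disq : List Int) (e : Nat) (fl : Int) (i : Nat) : Int :=
  if h : i < e then
    if disq.getD i 0 = -1 then
      let j := runEnd disq e (i + 1)
      if fl ≤ (j : Int) - (i : Int) then (i : Int)
      else goB disq e fl j
    else goB disq e fl (i + 1)
  else -1
termination_by e - i
decreasing_by
  · have := le_runEnd disq e (i + 1); omega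
  · omega

def find_space_for_file_alt (disq : List Int) (file_start : Int) (file_length : Int) : Int :=
  goB disq (min file_start.toNat disq.length) file_length 0

-- ===== PRECONDITION & SPEC =====
-- Pre_ excludes file_start > len(disq): there A raises IndexError whenever the scan
-- reaches the end of the list (it may still return if it breaks early on a fitting run).
def Pre_find_space_for_file (disq : List Int) (file_start : Int) (file_length : Int) : Prop :=
  file_start ≤ (disq.length : Int)
instance (disq : List Int) (file_start : Int) (file_length : Int) : Decidable (Pre_find_space_for_file disq file_start file_length) := by unfold Pre_find_space_for_file; infer_instance

def pvWitness_find_space_for_file : List Int × Int × Int := ([-1, 0, -1, -1], 4, 2)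

def Spec_find_space_for_file (disq : List Int) (file_start : Int) (file_length : Int) (out : Int) : Prop := out = find_space_for_file_alt disq file_start file_length
instance (disq : List Int) (file_start : Int) (file_length : Int) (out : Int) : Decidable (Spec_find_space_for_file disq file_start file_length out) := by unfold Spec_find_space_for_file; infer_instance

-- ===== CLAIM (what is proved, stated in full; the proofs are below) =====
def Claim_equal_find_space_for_file : Prop := ∀ (disq : List Int) (file_start : Int) (file_length : Int), Dom_find_space_for_file disq file_start file_length → Pre_find_space_for_file disq file_start file_length → Spec_find_space_for_file disq file_start file_length (find_space_for_file disq file_start file_length)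

-- ===== LEMMAS AND PROOFS =====

theorem runEnd_le (disq : List Int) (e j : Nat) (h : j ≤ e) : runEnd disq e j ≤ e := by
  unfold runEnd
  split
  · split
    · exact runEnd_le disq e (j + 1) (by omega)
    · exact h
  · exact h
termination_by e - j

theorem runEnd_eq_of_free (disq : List Int) (e j : Nat) (hj : j < e)
    (hv : disq.getD j 0 = -1) : runEnd disq e j = runEnd disq e (j + 1) := by
  rw [runEnd, if_pos hj, if_pos hv]

theorem runEnd_eq_self_of_stop (disq : List Int) (e j : Nat)
    (h : ¬ (j < e ∧ disq.getD j 0 = -1)) : runEnd disq e j = j := by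
  rw [runEnd]
  by_cases hj : j < e
  · have hv : ¬ disq.getD j 0 = -1 := fun hv => h ⟨hj, hv⟩
    rw [if_pos hj, if_neg hv]
  · rw [if_neg hj]

theorem pyGet_eq (disq : List Int) (m : Nat) (hm : m < disq.length) :
    PySem.List.pyGet? disq (m : Int) = some (disq.getD m 0) := by
  rw [PySem.List.pyGet?_natCast]
  simp [List.getD_eq_getElem?_getD, List.getElem?_eq_getElem hm]

-- one A-step on a free cell
theorem goA_free (disq : List Int) (fl : Int) (m : Nat) (rest : List Int)
    (c s best : Int) (hml : m < disq.length) (hv : disq.getD m 0 = -1) :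
    goA disq fl ((m : Int) :: rest) (c, s, best) =
      (if fl ≤ c + 1 then (if c = 0 then (m : Int) else s)
       else goA disq fl rest (c + 1, (if c = 0 then (m : Int) else s), best)) := by
  rw [List.getD_eq_getElem?_getD] at hv
  simp [goA, pyGet_eq disq m hml, hv]

-- one A-step on an occupied cell
theorem goA_occ (disq : List Int) (fl : Int) (m : Nat) (rest : List Int)
    (c s best : Int) (hml : m < disq.length) (hv : ¬ disq.getD m 0 = -1) :
    goA disq fl ((m : Int) :: rest) (c, s, best) = goA disq fl rest (0, -1, best) := by
  rw [List.getD_eq_getElem?_getD] at hv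
  simp [goA, pyGet_eq disq m hml, hv]

-- one B-step on a free cell
theorem goB_free (disq : List Int) (e : Nat) (fl : Int) (i : Nat)
    (hie : i < e) (hv : disq.getD i 0 = -1) :
    goB disq e fl i =
      (if fl ≤ ((runEnd disq e (i + 1) : Int) - (i : Int)) then (i : Int)
       else goB disq e fl (runEnd disq e (i + 1))) := by
  rw [List.getD_eq_getElem?_getD] at hv
  rw [goB]; simp [hie, hv]

-- one B-step on an occupied cell
theorem goB_occ (disq : List Int) (e : Nat) (fl : Int) (i : Nat)
    (hie : i < e) (hv : ¬ disq.getD i 0 = -1) :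
    goB disq e fl i = goB disq e fl (i + 1) := by
  rw [List.getD_eq_getElem?_getD] at hv
  rw [goB]; simp [hie, hv]

theorem goB_stop (disq : List Int) (e : Nat) (fl : Int) (i : Nat)
    (hie : ¬ i < e) : goB disq e fl i = -1 := by
  rw [goB]; simp [hie]

-- in-run invariant: A's counter within a run of -1 cells
theorem runA (disq : List Int) (fl : Int) (e m : Nat) (hm : m ≤ e)
    (he : e ≤ disq.length) (c s : Int) (hc : 1 ≤ c) (hcl : c < fl) :
    goA disq fl (PySem.List.pyRange (m : Int) (e : Int) 1) (c, s, -1) =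
      if fl ≤ ((runEnd disq e m : Int) - (m : Int)) + c then s
      else goA disq fl (PySem.List.pyRange (runEnd disq e m : Int) (e : Int) 1) (0, -1, -1) := by
  by_cases hme : m < e
  · have hml : m < disq.length := lt_of_lt_of_le hme he
    have hcons : PySem.List.pyRange (m : Int) (e : Int) 1
        = (m : Int) :: PySem.List.pyRange ((m : Int) + 1) (e : Int) 1 :=
      PySem.List.pyRange_one_cons (by exact_mod_cast hme)
    have hcast : ((m : Int) + 1) = ((m + 1 : Nat) : Int) := by push_cast; ring
    have hc0 : ¬ c = 0 := by omega
    by_cases hv : disq.getD m 0 = -1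
    · -- free cell: run continues
      have hr1 : runEnd disq e m = runEnd disq e (m + 1) := runEnd_eq_of_free disq e m hme hv
      have hrge : m + 1 ≤ runEnd disq e (m + 1) := le_runEnd disq e (m + 1)
      rw [hcons, goA_free disq fl m _ c s (-1) hml hv, if_neg hc0]
      by_cases hbrk : fl ≤ c + 1
      · -- A breaks here; the run is long enough
        have hcond : fl ≤ ((runEnd disq e m : Int) - (m : Int)) + c := by
          rw [hr1]
          have : (m : Int) + 1 ≤ (runEnd disq e (m + 1) : Int) := by exact_mod_cast hrge
          omega
        rw [if_pos hbrk, if_pos hcond]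
      · -- A keeps counting; apply the invariant at m+1 with counter c+1
        rw [if_neg hbrk, hcast]
        refine (runA disq fl e (m + 1) (by omega) he (c + 1) s (by omega) (by omega)).trans ?_
        rw [← hr1]
        exact if_congr (by push_cast; omega) rfl rfl
    · -- occupied cell: the run ends right before m, counter too small, both reset
      have hr : runEnd disq e m = m := runEnd_eq_self_of_stop disq e m (by tauto)
      have hcond : ¬ fl ≤ ((runEnd disq e m : Int) - (m : Int)) + c := by rw [hr]; omega
      rw [if_neg hcond, hr, hcons, goA_occ disq fl m _ c s (-1) hml hv,
          goA_occ disq fl m _ 0 (-1) (-1) hml hv]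
  · -- m = e: empty range, counter below fl on both sides
    have hnil : PySem.List.pyRange (m : Int) (e : Int) 1 = [] :=
      PySem.List.pyRange_one_eq_nil (by exact_mod_cast (by omega : e ≤ m))
    have hr : runEnd disq e m = m := runEnd_eq_self_of_stop disq e m (by omega)
    have hcond : ¬ fl ≤ ((runEnd disq e m : Int) - (m : Int)) + c := by rw [hr]; omega
    rw [if_neg hcond, hr, hnil]
    rfl
termination_by e - m

-- main loop correspondence: A's cell-by-cell scan from a fresh state = B's run scan
theorem AB (disq : List Int) (fl : Int) (e i : Nat) (hi : i ≤ e) (he : e ≤ disq.length) :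
    goA disq fl (PySem.List.pyRange (i : Int) (e : Int) 1) (0, -1, -1) = goB disq e fl i := by
  by_cases hie : i < e
  · have hil : i < disq.length := lt_of_lt_of_le hie he
    have hcons : PySem.List.pyRange (i : Int) (e : Int) 1
        = (i : Int) :: PySem.List.pyRange ((i : Int) + 1) (e : Int) 1 :=
      PySem.List.pyRange_one_cons (by exact_mod_cast hie)
    have hcast : ((i : Int) + 1) = ((i + 1 : Nat) : Int) := by push_cast; ring
    by_cases hv : disq.getD i 0 = -1
    · have hrge : i + 1 ≤ runEnd disq e (i + 1) := le_runEnd disq e (i + 1)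
      have hrle : runEnd disq e (i + 1) ≤ e := runEnd_le disq e (i + 1) (by omega)
      rw [hcons, goA_free disq fl i _ 0 (-1) (-1) hil hv, if_pos rfl,
          goB_free disq e fl i hie hv]
      by_cases hone : fl ≤ 0 + 1
      · -- file_length ≤ 1: A breaks at the first free cell; B's run test passes too
        have hcond : fl ≤ ((runEnd disq e (i + 1) : Int) - (i : Int)) := by
          have : (i : Int) + 1 ≤ (runEnd disq e (i + 1) : Int) := by exact_mod_cast hrge
          omega
        rw [if_pos hone, if_pos hcond]
      · rw [if_neg hone, hcast, zero_add]
        refine (runA disq fl e (i + 1) (by omega) he 1 (i : Int) le_rfl (by omega)).trans ?_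
        refine if_congr (by push_cast; omega) rfl ?_
        exact AB disq fl e (runEnd disq e (i + 1)) hrle he
    · rw [hcons, goA_occ disq fl i _ 0 (-1) (-1) hil hv, goB_occ disq e fl i hie hv, hcast]
      exact AB disq fl e (i + 1) hie he
  · have hnil : PySem.List.pyRange (i : Int) (e : Int) 1 = [] :=
      PySem.List.pyRange_one_eq_nil (by exact_mod_cast (by omega : e ≤ i))
    rw [hnil, goB_stop disq e fl i hie]
    rfl
termination_by e - i
decreasing_by
  · have := le_runEnd disq e (i + 1); omega
  · omega

-- ===== VERDICT (by name: the statement is the Claim_ definition above) =====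
theorem find_space_for_file_spec : Claim_equal_find_space_for_file := by
  intro disq file_start file_length _ hpre
  unfold Spec_find_space_for_file find_space_for_file find_space_for_file_alt
  unfold Pre_find_space_for_file at hpre
  by_cases hfs : file_start ≤ 0
  · have hnil : PySem.List.pyRange 0 file_start 1 = [] :=
      PySem.List.pyRange_one_eq_nil hfs
    have he0 : min file_start.toNat disq.length = 0 := by
      have : file_start.toNat = 0 := Int.toNat_of_nonpos hfs
      omega
    rw [hnil, he0, goB_stop disq 0 file_length 0 (by omega)]
    rfl
  · have htn : (file_start.toNat : Int) = file_start := Int.toNat_of_nonneg (by omega)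
    have hlen : file_start.toNat ≤ disq.length := by omega
    have hmin : min file_start.toNat disq.length = file_start.toNat := by omega
    rw [hmin, ← AB disq file_length file_start.toNat 0 (by omega) hlen]
    rw [htn]
    norm_num
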